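-- pv_equiv track=rewrite | github.com/pypi-data/pypi-mirror-402 | packages/job-stalker/job_stalker-0.3.0-py3-none-any.whl/job_stalker/main.py | keyword_filter_check
-- ===== SOURCE A (Python) =====
-- def keyword_filter_check(text: str, keyword_filter: str) -> bool:
--     if not keyword_filter.strip():
--         return True
--
--     keywords = [kw.strip().lower() for kw in keyword_filter.split(",") if kw.strip()]
--     text_lower = text.lower()
--
--     for keyword in keywords:
--         if keyword in text_lower:
--             return True
--
--     return False
-- ===== SOURCE B (Python) =====
-- def keyword_filter_check(text: str, keyword_filter: str) -> bool:
--     if not keyword_filter.strip():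
--         return True
--
--     # normalize every comma-separated piece first, then drop the empty ones
--     keywords = [kw for kw in (p.strip().lower() for p in keyword_filter.split(",")) if kw]
--     text_lower = text.lower()
--
--     # position scan: at each start index, test whether some keyword sits there
--     for i in range(len(text_lower) + 1):
--         for kw in keywords:
--             if text_lower[i:i + len(kw)] == kw:
--                 return True
--     return False
-- ===== Notes on version B (the rewrite author's own statement) =====
-- stated objective: alternative
-- what changed: B keeps the guard and keyword parsing but replaces A's per-keyword substring searches with a single outer scan over text positions, testing at each position whether some keyword starts there via slice comparison.
import Mathlib
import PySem

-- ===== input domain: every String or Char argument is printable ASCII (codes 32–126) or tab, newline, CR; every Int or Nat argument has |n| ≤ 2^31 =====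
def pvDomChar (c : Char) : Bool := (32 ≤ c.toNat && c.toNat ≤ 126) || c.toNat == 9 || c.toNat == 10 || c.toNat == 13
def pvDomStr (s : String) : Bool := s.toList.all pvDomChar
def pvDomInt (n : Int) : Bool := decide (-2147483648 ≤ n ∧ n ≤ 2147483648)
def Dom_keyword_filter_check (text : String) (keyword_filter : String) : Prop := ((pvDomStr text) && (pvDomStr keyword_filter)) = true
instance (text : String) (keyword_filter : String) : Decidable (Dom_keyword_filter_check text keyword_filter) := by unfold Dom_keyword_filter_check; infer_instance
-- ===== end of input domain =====

-- B keeps A's guard and keyword parsing but replaces A's per-keyword substring searches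
-- with one scan over text positions, testing each keyword by slice comparison (objective: alternative).

-- ===== PORT A =====
def keyword_filter_check (text : String) (keyword_filter : String) : Bool :=
  if PySem.Str.strip keyword_filter == "" then true
  else
    let keywords := (((PySem.Str.split? keyword_filter ",").getD []).filter
        (fun kw => !(PySem.Str.strip kw == ""))).map
        (fun kw => PySem.Str.lower (PySem.Str.strip kw))
    let text_lower := PySem.Str.lower text
    -- 'for keyword in keywords: if keyword in text_lower: return True' / 'return False'
    keywords.any (fun keyword => PySem.Str.isIn keyword text_lower)

-- ===== PORT B =====
def keyword_filter_check_alt (text : String) (keyword_filter : String) : Bool :=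
  if PySem.Str.strip keyword_filter == "" then true
  else
    -- '[kw for kw in (p.strip().lower() for p in keyword_filter.split(",")) if kw]'
    let keywords := (((PySem.Str.split? keyword_filter ",").getD []).map
        (fun p => PySem.Str.lower (PySem.Str.strip p))).filter (fun kw => !(kw == ""))
    let text_lower := PySem.Str.lower text
    -- 'for i in range(len(text_lower)+1): for kw in keywords: if text_lower[i:i+len(kw)] == kw: return True'
    (PySem.List.pyRange 0 (PySem.Str.len text_lower + 1) 1).any (fun i =>
      keywords.any (fun kw =>
        PySem.Str.slice text_lower (some i) (some (i + PySem.Str.len kw)) == kw))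

-- ===== PRECONDITION & SPEC =====
def Spec_keyword_filter_check (text : String) (keyword_filter : String) (out : Bool) : Prop := out = keyword_filter_check_alt text keyword_filter
instance (text : String) (keyword_filter : String) (out : Bool) : Decidable (Spec_keyword_filter_check text keyword_filter out) := by unfold Spec_keyword_filter_check; infer_instance

-- ===== CLAIM (what is proved, stated in full; the proofs are below) =====
def Claim_equal_keyword_filter_check : Prop := ∀ (text : String) (keyword_filter : String), Dom_keyword_filter_check text keyword_filter → Spec_keyword_filter_check text keyword_filter (keyword_filter_check text keyword_filter)

-- ===== LEMMAS AND PROOFS =====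

-- a normalized piece is empty iff the stripped piece was
theorem lower_strip_beq_empty (p : String) :
    (PySem.Str.lower (PySem.Str.strip p) == "") = (PySem.Str.strip p == "") := by
  rw [Bool.eq_iff_iff, beq_iff_eq, beq_iff_eq]
  constructor
  · intro h
    have h2 := congrArg String.toList h
    rw [PySem.Str.toList_lower] at h2
    simp only [PySem.Chars.lower] at h2
    rw [← String.toList_inj]
    simpa [List.map_eq_nil_iff] using h2
  · intro h
    rw [h]
    decide

-- normalize-then-filter parses the same keyword list as filter-then-normalize
theorem parse_comm (l : List String) :
    ((l.map (fun p => PySem.Str.lower (PySem.Str.strip p))).filter (fun kw => !(kw == "")))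
      = ((l.filter (fun kw => !(PySem.Str.strip kw == ""))).map
          (fun kw => PySem.Str.lower (PySem.Str.strip kw))) := by
  induction l with
  | nil => rfl
  | cons x xs ih =>
    by_cases h : (PySem.Str.strip x == "") = true
    · simp [lower_strip_beq_empty, h, ih]
    · simp [lower_strip_beq_empty, h, ih]

-- swapping the two nested 'any' loops does not change the result
theorem any_any_comm {α β : Type} (l : List α) (m : List β) (f : α → β → Bool) :
    l.any (fun a => m.any (fun b => f a b)) = m.any (fun b => l.any (fun a => f a b)) := by
  rw [Bool.eq_iff_iff]; simp only [List.any_eq_true]; tauto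

-- the slice of kw's length starting at j equals kw iff kw is a prefix-at-j, stated on lists
theorem slice_beq_iff (t kw : String) (j : Nat) :
    (PySem.Str.slice t (some (j : Int)) (some ((j : Int) + PySem.Str.len kw)) == kw) = true
      ↔ (t.toList.drop j).take kw.toList.length = kw.toList := by
  rw [beq_iff_eq, ← String.toList_inj, PySem.Str.toList_slice,
    PySem.Chars.slice_eq_listSlice, PySem.Str.len_eq,
    PySem.List.slice_natCast_add]

-- 'kw in t' is true iff at some position 0 ≤ i ≤ len(t) the slice of kw's length equals kw
theorem isIn_eq_position_scan (kw t : String) :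
    PySem.Str.isIn kw t =
      (PySem.List.pyRange 0 (PySem.Str.len t + 1) 1).any (fun i =>
        PySem.Str.slice t (some i) (some (i + PySem.Str.len kw)) == kw) := by
  rw [Bool.eq_iff_iff]
  simp only [List.any_eq_true, PySem.List.mem_pyRange_one, PySem.Str.isIn_eq,
    PySem.Str.len_eq]
  rw [← PySem.Chars.exists_prefix_drop_iff_isIn]
  constructor
  · rintro ⟨j, hj⟩
    have hj' : kw.toList <+: t.toList.drop (min j t.toList.length) := by
      by_cases h : j ≤ t.toList.length
      · rw [Nat.min_eq_left h]; exact hj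
      · have hd : t.toList.drop j = [] := List.drop_eq_nil_of_le (by omega)
        rw [hd, List.prefix_nil] at hj
        simp [hj]
    refine ⟨(min j t.toList.length : Nat), ⟨by positivity, by push_cast; omega⟩, ?_⟩
    rw [show ((min j t.toList.length : Nat) : Int) + (kw.toList.length : Int)
        = ((min j t.toList.length : Nat) : Int) + PySem.Str.len kw by rw [PySem.Str.len_eq]]
    exact (slice_beq_iff t kw _).mpr (List.prefix_iff_eq_take.mp hj').symm
  · rintro ⟨i, ⟨h0, _⟩, hi⟩
    refine ⟨i.toNat, List.prefix_iff_eq_take.mpr ?_⟩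
    have hcast : i = ((i.toNat : Nat) : Int) := by omega
    rw [hcast] at hi
    rw [show ((i.toNat : Nat) : Int) + (kw.toList.length : Int)
        = ((i.toNat : Nat) : Int) + PySem.Str.len kw by rw [PySem.Str.len_eq]] at hi
    exact ((slice_beq_iff t kw _).mp hi).symm

-- ===== VERDICT (by name: the statement is the Claim_ definition above) =====
theorem keyword_filter_check_spec : Claim_equal_keyword_filter_check := by
  intro text keyword_filter _
  show keyword_filter_check text keyword_filter = keyword_filter_check_alt text keyword_filter
  unfold keyword_filter_check keyword_filter_check_alt
  split
  · rfl
  · rw [parse_comm]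
    simp only [isIn_eq_position_scan]
    exact any_any_comm _ _ _
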